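-- pv_equiv track=rewrite | github.com/warlmare/FRASHER | lib/helpers/helper.py | merge_adjacent_tuples
-- ===== SOURCE A (Python) =====
-- def merge_adjacent_tuples(done, rest) -> list:
--     '''merges adjacent tuples
--
--     call via parse(a[:1], a[1:]) a beeing the list of lists
--
--     a = [[0, 3], [4, 6], [6, 9], [9, 11], [11, 15], [15, 20]] --> [[0, 3], [6, 20]
--
--     :param lst:
--     :return: lst
--     '''
--
--     if len(rest) == 0:
--         return (done)
--
--     x = done.pop(-1)
--     y = rest.pop(0)
--     if x[1] == y[0]:
--         done.append([x[0], y[1]])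
--     else:
--         done.append(x)
--         done.append(y)
--
--     return merge_adjacent_tuples(done, rest)
-- ===== SOURCE B (Python) =====
-- def merge_adjacent_tuples(done, rest):
--     if not rest:
--         return done
--     out = done[:-1]
--     cur = done[-1]
--     for y in rest:
--         if cur[1] == y[0]:
--             cur = [cur[0], y[1]]
--         else:
--             out.append(cur)
--             cur = y
--     out.append(cur)
--     return out
-- ===== Notes on version B (the rewrite author's own statement) =====
-- stated objective: alternative
-- what changed: Replaces the tail recursion that repeatedly pops the last of done and the first of rest with a single iterative pass over rest that carries the current run in an accumulator and appends it when a gap is found; B does not mutate its arguments (return value only).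
-- outside the precondition, e.g. on merge_adjacent_tuples([[0, 5]], [[6]]): A returns [[0, 5], [6]], B returns [[0, 5], [6]]
import Mathlib
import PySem

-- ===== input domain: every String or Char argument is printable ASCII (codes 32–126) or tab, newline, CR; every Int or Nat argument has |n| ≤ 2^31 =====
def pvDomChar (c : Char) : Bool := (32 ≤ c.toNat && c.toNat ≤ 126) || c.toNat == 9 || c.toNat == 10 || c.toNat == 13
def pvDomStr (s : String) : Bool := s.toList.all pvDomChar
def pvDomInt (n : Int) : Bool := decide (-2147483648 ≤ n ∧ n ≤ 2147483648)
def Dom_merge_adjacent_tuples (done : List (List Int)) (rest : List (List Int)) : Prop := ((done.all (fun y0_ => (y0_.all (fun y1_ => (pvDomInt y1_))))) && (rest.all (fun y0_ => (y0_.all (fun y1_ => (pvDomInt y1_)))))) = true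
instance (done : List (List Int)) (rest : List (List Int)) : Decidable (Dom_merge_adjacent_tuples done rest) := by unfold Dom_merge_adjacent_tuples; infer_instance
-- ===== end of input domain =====

-- B replaces A's tail recursion (pop last of done / pop first of rest) by one iterative pass over
-- rest carrying the current run in an accumulator; equivalence is about the RETURN value only
-- (A mutates both arguments in place, B leaves them untouched).


-- ===== PORT A =====
-- A: if rest empty return done; else x = done.pop(-1), y = rest.pop(0), merge or re-append, recurse.
-- Where Python raises (pop(-1) on empty done, or an out-of-range x[1]/y[0]/x[0]/y[1]) the
-- corresponding PySem primitive is none and the port returns []; those inputs are excluded by Pre_.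
def merge_adjacent_tuples (done : List (List Int)) (rest : List (List Int)) : List (List Int) :=
  match rest with
  | [] => done
  | y :: rest' =>
    match PySem.List.pop? done (-1) with
    | none => []  -- IndexError: pop from empty list
    | some (x, done') =>
      match PySem.List.pyGet? x 1, PySem.List.pyGet? y 0 with
      | some x1, some y0 =>
        if x1 = y0 then
          match PySem.List.pyGet? x 0, PySem.List.pyGet? y 1 with
          | some x0, some y1 => merge_adjacent_tuples (done' ++ [[x0, y1]]) rest'
          | _, _ => []  -- IndexError
        else
          merge_adjacent_tuples (done' ++ [x, y]) rest'
      | _, _ => []  -- IndexError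
  termination_by rest.length

-- ===== PORT B =====
-- B: split off done's last element as the running accumulator `cur`, fold once over rest,
-- appending `cur` to `out` at each gap; the fold state is none once an index would have raised.
def merge_adjacent_tuples_alt (done : List (List Int)) (rest : List (List Int)) : List (List Int) :=
  if rest.isEmpty then done
  else
    (done.getLast?).elim []  -- none: IndexError, done[-1] on empty done (excluded by Pre_)
      (fun cur0 =>
        let st := rest.foldl
          (fun (s : Option (List (List Int) × List Int)) y =>
            s.bind (fun oc =>
              (PySem.List.pyGet? oc.2 1).bind (fun c1 =>
              (PySem.List.pyGet? y 0).bind (fun y0 =>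
              if c1 = y0 then
                (PySem.List.pyGet? oc.2 0).bind (fun c0 =>
                (PySem.List.pyGet? y 1).bind (fun y1 =>
                some (oc.1, [c0, y1])))
              else some (oc.1 ++ [oc.2], y)))))
          (some (done.dropLast, cur0))
        st.elim [] (fun oc => oc.1 ++ [oc.2]))

-- ===== PRECONDITION & SPEC =====
-- Pre_ excludes exactly the runs that could hit a too-short inner list: when rest is non-empty it
-- requires done non-empty, done's last element of length ≥ 2 and every element of rest of length ≥ 2.
-- This closed form over-approximates the raising inputs slightly: A also happens to return when the
-- LAST element of rest has length 1 and is not merged (cites in claim.json); B returns the same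
-- value there, the exact raise set depends on the merge dynamics and is not closed-form.
def Pre_merge_adjacent_tuples (done : List (List Int)) (rest : List (List Int)) : Prop :=
  rest ≠ [] → done ≠ [] ∧ (∀ l ∈ done.getLast?, 2 ≤ l.length) ∧ (∀ l ∈ rest, 2 ≤ l.length)
instance (done : List (List Int)) (rest : List (List Int)) : Decidable (Pre_merge_adjacent_tuples done rest) := by unfold Pre_merge_adjacent_tuples; infer_instance
def pvWitness_merge_adjacent_tuples : List (List Int) × List (List Int) :=
  ([[0, 3]], [[4, 6], [6, 9], [9, 11]])
def Spec_merge_adjacent_tuples (done : List (List Int)) (rest : List (List Int)) (out : List (List Int)) : Prop := out = merge_adjacent_tuples_alt done rest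
instance (done : List (List Int)) (rest : List (List Int)) (out : List (List Int)) : Decidable (Spec_merge_adjacent_tuples done rest out) := by unfold Spec_merge_adjacent_tuples; infer_instance

-- ===== CLAIM (what is proved, stated in full; the proofs are below) =====
def Claim_equal_merge_adjacent_tuples : Prop := ∀ (done : List (List Int)) (rest : List (List Int)), Dom_merge_adjacent_tuples done rest → Pre_merge_adjacent_tuples done rest → Spec_merge_adjacent_tuples done rest (merge_adjacent_tuples done rest)

-- ===== LEMMAS AND PROOFS =====

-- The loop invariant: A applied to out ++ [cur] equals B's fold started in state (out, cur),
-- provided cur and all elements of rest have length ≥ 2.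
theorem merge_core (rest : List (List Int)) : ∀ (out : List (List Int)) (cur : List Int),
    2 ≤ cur.length → (∀ l ∈ rest, 2 ≤ l.length) →
    merge_adjacent_tuples (out ++ [cur]) rest =
      (rest.foldl
        (fun (s : Option (List (List Int) × List Int)) y =>
          s.bind (fun oc =>
            (PySem.List.pyGet? oc.2 1).bind (fun c1 =>
            (PySem.List.pyGet? y 0).bind (fun y0 =>
            if c1 = y0 then
              (PySem.List.pyGet? oc.2 0).bind (fun c0 =>
              (PySem.List.pyGet? y 1).bind (fun y1 =>
              some (oc.1, [c0, y1])))
            else some (oc.1 ++ [oc.2], y)))))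
        (some (out, cur))).elim [] (fun oc => oc.1 ++ [oc.2]) := by
  induction rest with
  | nil =>
    intro out cur _ _
    simp [merge_adjacent_tuples]
  | cons y rest' ih =>
    intro out cur hcur hrest
    obtain ⟨c0, c1, ctl, rfl⟩ : ∃ a b t, cur = a :: b :: t := by
      match cur, hcur with
      | a :: b :: t, _ => exact ⟨a, b, t, rfl⟩
    obtain ⟨a0, a1, atl, rfl⟩ : ∃ a b t, y = a :: b :: t := by
      have := hrest y (by simp)
      match y, this with
      | a :: b :: t, _ => exact ⟨a, b, t, rfl⟩
    have hrest' : ∀ l ∈ rest', 2 ≤ l.length := fun l hl => hrest l (by simp [hl])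
    rw [merge_adjacent_tuples]
    rw [PySem.List.pop?_last]
    have g1 : PySem.List.pyGet? (c0 :: c1 :: ctl) 1 = some c1 := by
      simp [PySem.List.pyGet?, PySem.List.pyIdx?]
    have g2 : PySem.List.pyGet? (a0 :: a1 :: atl) 0 = some a0 :=
      PySem.List.pyGet?_zero_cons _ _
    have g3 : PySem.List.pyGet? (c0 :: c1 :: ctl) 0 = some c0 :=
      PySem.List.pyGet?_zero_cons _ _
    have g4 : PySem.List.pyGet? (a0 :: a1 :: atl) 1 = some a1 := by
      simp [PySem.List.pyGet?, PySem.List.pyIdx?]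
    by_cases h : c1 = a0
    · simp only [List.foldl_cons, g1, g2, g3, g4, if_pos h, Option.bind_some]
      exact ih out [c0, a1] (by simp) hrest'
    · simp only [List.foldl_cons, g1, g2, g3, g4, if_neg h, Option.bind_some]
      have := ih (out ++ [c0 :: c1 :: ctl]) (a0 :: a1 :: atl) (by simp) hrest'
      simpa using this
-- ===== VERDICT (by name: the statement is the Claim_ definition above) =====
theorem merge_adjacent_tuples_spec : Claim_equal_merge_adjacent_tuples := by
  intro done rest _hdom hpre
  unfold Spec_merge_adjacent_tuples
  match rest with
  | [] => simp [merge_adjacent_tuples, merge_adjacent_tuples_alt]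
  | y :: rest' =>
    obtain ⟨hne, hlast, hrest⟩ := hpre (by simp)
    obtain ⟨out, cur, rfl⟩ : ∃ o c, done = o ++ [c] := by
      rcases List.eq_nil_or_concat done with h | ⟨o, c, h⟩
      · exact absurd h hne
      · exact ⟨o, c, by simpa using h⟩
    have hcur : 2 ≤ cur.length := hlast cur (by simp)
    rw [merge_core (y :: rest') out cur hcur hrest]
    simp only [merge_adjacent_tuples_alt, List.getLast?_concat, List.dropLast_concat,
      List.isEmpty_cons, Bool.false_eq_true, if_false, Option.elim_some]
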